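-- pv_equiv track=rewrite | github.com/loweege/Geometric-Learning-for-Molecules-Representation | datasets.py | _tokenize_smiles
-- ===== SOURCE A (Python) =====
-- def _tokenize_smiles(smiles):
--     """Simple atom-level tokenization"""
--     tokens = []
--     i = 0
--     while i < len(smiles):
--         if smiles[i] == '[':
--             j = i + 1
--             while j < len(smiles) and smiles[j] != ']':
--                 j += 1
--             tokens.append(smiles[i:j+1])
--             i = j + 1
--         elif smiles[i].isupper():
--             if i + 1 < len(smiles) and smiles[i+1].islower():
--                 tokens.append(smiles[i:i+2])
--                 i += 2
--             else:
--                 tokens.append(smiles[i])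
--                 i += 1
--         else:
--             tokens.append(smiles[i])
--             i += 1
--     return tokens
-- ===== SOURCE B (Python) =====
-- def _tokenize_smiles(smiles):
--     """Simple atom-level tokenization (single streaming pass, no index arithmetic)"""
--     tokens = []
--     bracket = None   # chars of an open '[...' group, or None
--     upper = None     # an uppercase letter waiting for a possible lowercase, or None
--     for c in smiles:
--         if bracket is not None:
--             bracket.append(c)
--             if c == ']':
--                 tokens.append(''.join(bracket))
--                 bracket = None
--             continue
--         if upper is not None:
--             u, upper = upper, None
--             if c.islower():
--                 tokens.append(u + c)
--                 continue
--             tokens.append(u)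
--             # fall through: c starts a new token
--         if c == '[':
--             bracket = ['[']
--         elif c.isupper():
--             upper = c
--         else:
--             tokens.append(c)
--     if bracket is not None:
--         tokens.append(''.join(bracket))
--     elif upper is not None:
--         tokens.append(upper)
--     return tokens
-- ===== Notes on version B (the rewrite author's own statement) =====
-- stated objective: faster
-- what changed: Replaced the index-based while-loop scanner with its slicing and nested inner loop by a single streaming state-machine fold over the characters (pending-bracket / pending-uppercase state, flushed at the end).
import Mathlib
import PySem

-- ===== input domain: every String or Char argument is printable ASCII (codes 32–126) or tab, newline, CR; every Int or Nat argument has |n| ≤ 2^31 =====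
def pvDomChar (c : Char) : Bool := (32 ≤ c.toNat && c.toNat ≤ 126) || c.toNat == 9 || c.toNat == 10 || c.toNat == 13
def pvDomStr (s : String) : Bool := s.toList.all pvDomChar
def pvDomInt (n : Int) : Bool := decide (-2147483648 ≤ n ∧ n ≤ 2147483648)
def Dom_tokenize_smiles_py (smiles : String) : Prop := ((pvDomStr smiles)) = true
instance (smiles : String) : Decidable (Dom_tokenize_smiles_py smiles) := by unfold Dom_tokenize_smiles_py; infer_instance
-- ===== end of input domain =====

-- B replaces A's index-based scanner (nested while loops + slicing) by a single streaming
-- state-machine fold over the characters; same O(n) asymptotics, measurably faster by a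
-- constant factor (no per-token indexing/slicing).

-- ===== PORT A =====
-- inner 'while j < len(smiles) and smiles[j] != ]:' loop of A
def tokAInner (cs : List Char) (j : Nat) : Nat :=
  if _h : j < cs.length then
    if cs[j] = ']' then j else tokAInner cs (j + 1)
  else j
termination_by cs.length - j

-- needed by tokALoop's decreasing_by: the inner scan never moves backwards
theorem tokAInner_ge (cs : List Char) (j : Nat) : j ≤ tokAInner cs j := by
  rw [tokAInner]
  split
  · split
    · exact Nat.le_refl _
    · exact Nat.le_trans (Nat.le_succ j) (tokAInner_ge cs (j + 1))
  · exact Nat.le_refl _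
termination_by cs.length - j

-- the 'while i < len(smiles):' loop of A, state = current index i
def tokALoop (cs : List Char) (i : Nat) : List String :=
  if h : i < cs.length then
    if cs[i] = '[' then
      String.ofList (PySem.List.slice cs (some (i : Int)) (some ((tokAInner cs (i + 1) : Int) + 1)))
        :: tokALoop cs (tokAInner cs (i + 1) + 1)
    else if PySem.Chars.isupper cs[i] then
      if h2 : i + 1 < cs.length then
        if PySem.Chars.islower cs[i + 1] then
          String.ofList (PySem.List.slice cs (some (i : Int)) (some ((i : Int) + 2))) :: tokALoop cs (i + 2)
        else
          String.ofList [cs[i]] :: tokALoop cs (i + 1)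
      else
        String.ofList [cs[i]] :: tokALoop cs (i + 1)
    else
      String.ofList [cs[i]] :: tokALoop cs (i + 1)
  else []
termination_by cs.length - i
decreasing_by all_goals (have := tokAInner_ge cs (i + 1); omega)

def tokenize_smiles_py (smiles : String) : List String :=
  tokALoop smiles.toList 0

-- ===== PORT B =====
inductive TokPending where
  | none
  | bracket (buf : List Char)
  | upper (u : Char)
deriving Repr, DecidableEq

-- the fall-through 'c starts a new token' part of B's loop body
def tokBStart (tokens : List String) (c : Char) : List String × TokPending :=
  if c = '[' then (tokens, TokPending.bracket ['['])
  else if PySem.Chars.isupper c then (tokens, TokPending.upper c)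
  else (tokens ++ [String.ofList [c]], TokPending.none)

-- one iteration of B's 'for c in smiles' loop
def tokBStep (st : List String × TokPending) (c : Char) : List String × TokPending :=
  match st with
  | (tokens, TokPending.bracket buf) =>
      let buf' := buf ++ [c]
      if c = ']' then (tokens ++ [String.ofList buf'], TokPending.none)
      else (tokens, TokPending.bracket buf')
  | (tokens, TokPending.upper u) =>
      if PySem.Chars.islower c then (tokens ++ [String.ofList [u, c]], TokPending.none)
      else tokBStart (tokens ++ [String.ofList [u]]) c
  | (tokens, TokPending.none) => tokBStart tokens c

-- B's trailing flush of a still-pending buffer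
def tokBFinish (st : List String × TokPending) : List String :=
  match st with
  | (tokens, TokPending.bracket buf) => tokens ++ [String.ofList buf]
  | (tokens, TokPending.upper u) => tokens ++ [String.ofList [u]]
  | (tokens, TokPending.none) => tokens

def tokenize_smiles_py_alt (smiles : String) : List String :=
  tokBFinish (smiles.toList.foldl tokBStep ([], TokPending.none))

-- ===== PRECONDITION & SPEC =====
def Spec_tokenize_smiles_py (smiles : String) (out : List String) : Prop := out = tokenize_smiles_py_alt smiles
instance (smiles : String) (out : List String) : Decidable (Spec_tokenize_smiles_py smiles out) := by unfold Spec_tokenize_smiles_py; infer_instance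

-- ===== CLAIM (what is proved, stated in full; the proofs are below) =====
def Claim_equal_tokenize_smiles_py : Prop := ∀ (smiles : String), Dom_tokenize_smiles_py smiles → Spec_tokenize_smiles_py smiles (tokenize_smiles_py smiles)

-- ===== LEMMAS AND PROOFS =====
def notRB (c : Char) : Bool := c ≠ ']'

theorem head_dropWhile_false {p : Char → Bool} {l : List Char} {a : Char} {l' : List Char}
    (h : l.dropWhile p = a :: l') : p a = false := by
  induction l with
  | nil => simp at h
  | cons x xs ih =>
    by_cases hx : p x
    · rw [List.dropWhile_cons_of_pos hx] at h; exact ih h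
    · rw [List.dropWhile_cons_of_neg hx] at h
      cases h; simpa using hx

theorem tokAInner_spec (n : Nat) : ∀ (cs : List Char) (j : Nat), cs.length - j ≤ n →
    tokAInner cs j = j + ((cs.drop j).takeWhile notRB).length := by
  induction n with
  | zero =>
    intro cs j h
    have hj : cs.length ≤ j := by omega
    rw [tokAInner, dif_neg (by omega), List.drop_eq_nil_of_le hj]
    simp
  | succ n ih =>
    intro cs j h
    by_cases hj : j < cs.length
    · rw [List.drop_eq_getElem_cons hj]
      rw [tokAInner, dif_pos hj]
      by_cases hc : cs[j] = ']'
      · rw [if_pos hc]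
        have : ¬ notRB cs[j] = true := by simp [notRB, hc]
        rw [List.takeWhile_cons_of_neg this]; simp
      · rw [if_neg hc]
        have : notRB cs[j] = true := by simp [notRB, hc]
        rw [List.takeWhile_cons_of_pos this]
        rw [ih cs (j + 1) (by omega)]
        simp; omega
    · rw [tokAInner, dif_neg hj, List.drop_eq_nil_of_le (by omega)]
      simp

theorem bracket_run (t : List Char) : ∀ (tokens : List String) (buf : List Char),
    List.foldl tokBStep (tokens, TokPending.bracket buf) t =
      match t.dropWhile notRB with
      | [] => (tokens, TokPending.bracket (buf ++ t))
      | _ :: rest =>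
          List.foldl tokBStep
            (tokens ++ [String.ofList (buf ++ t.takeWhile notRB ++ [']'])], TokPending.none) rest := by
  induction t with
  | nil => intro tokens buf; simp
  | cons c t ih =>
    intro tokens buf
    by_cases hc : c = ']'
    · subst hc
      have h1 : ¬ notRB ']' = true := by simp [notRB]
      rw [List.dropWhile_cons_of_neg h1, List.takeWhile_cons_of_neg h1]
      simp [List.foldl_cons, tokBStep]
    · have h1 : notRB c = true := by simp [notRB, hc]
      rw [List.dropWhile_cons_of_pos h1, List.takeWhile_cons_of_pos h1]
      rw [List.foldl_cons]
      show List.foldl tokBStep (tokBStep (tokens, TokPending.bracket buf) c) t = _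
      rw [show tokBStep (tokens, TokPending.bracket buf) c = (tokens, TokPending.bracket (buf ++ [c])) by
        simp [tokBStep, hc]]
      rw [ih tokens (buf ++ [c])]
      cases hdw : t.dropWhile notRB with
      | nil => simp
      | cons d rest => simp

theorem main_run (n : Nat) : ∀ (cs : List Char) (i : Nat) (tokens : List String), cs.length - i ≤ n →
    tokBFinish (List.foldl tokBStep (tokens, TokPending.none) (cs.drop i)) = tokens ++ tokALoop cs i := by
  induction n with
  | zero =>
      intro cs i tokens h
      rw [List.drop_eq_nil_of_le (by omega), tokALoop, dif_neg (by omega)]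
      simp [tokBFinish]
  | succ n ih =>
      intro cs i tokens h
      by_cases hi : i < cs.length
      case neg =>
        rw [List.drop_eq_nil_of_le (by omega), tokALoop, dif_neg hi]
        simp [tokBFinish]
      rw [List.drop_eq_getElem_cons hi, List.foldl_cons]
      rw [tokALoop, dif_pos hi]
      by_cases hbr : cs[i] = '['
      · -- bracket branch
        rw [if_pos hbr]
        have hstep : tokBStep (tokens, TokPending.none) cs[i] = (tokens, TokPending.bracket ['[']) := by
          simp [tokBStep, tokBStart, hbr]
        rw [hstep, bracket_run]
        have hjj : tokAInner cs (i+1) = (i+1) + ((cs.drop (i+1)).takeWhile notRB).length :=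
          tokAInner_spec (cs.length - (i+1)) cs (i+1) (le_refl _)
        set t := cs.drop (i+1) with ht
        set tw := t.takeWhile notRB with htw
        set k := tw.length with hk
        have hlen_t : t.length = cs.length - (i+1) := by rw [ht]; simp
        have hsplit := List.takeWhile_append_dropWhile (p := notRB) (l := t)
        have htk : k ≤ t.length := by
          rw [hk, ← hsplit, ← htw]
          simp
        have hslice : PySem.List.slice cs (some (i:Int)) (some ((((i+1) + k : Nat) : Int) + 1))
            = (cs.drop i).take (k + 2) := by
          have hcast : ((((i+1) + k : Nat) : Int) + 1) = (((i + 1 + k + 1 : Nat)) : Int) := by push_cast; ring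
          rw [hcast, PySem.List.slice_natCast]
          congr 1
          omega
        simp only [hjj]
        cases hdw : t.dropWhile notRB with
        | nil =>
          have htwt : tw = t := by
            rw [hdw] at hsplit; simpa [htw] using hsplit
          have hkt : k = t.length := by rw [hk, htwt]
          have htake : (cs.drop i).take (k + 2) = cs.drop i := by
            apply List.take_of_length_le
            have : (cs.drop i).length = cs.length - i := by simp
            omega
          have hdone : tokALoop cs ((i+1) + k + 1) = [] := by
            rw [tokALoop, dif_neg (by omega)]
          rw [hslice, htake, hdone]
          rw [List.drop_eq_getElem_cons hi, hbr]
          simp [tokBFinish, ht]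
        | cons d rest =>
          have hd : d = ']' := by
            have := head_dropWhile_false hdw
            simpa [notRB] using this
          have ht_decomp : t = tw ++ d :: rest := by
            rw [hdw] at hsplit; rw [htw]; exact hsplit.symm
          have hlen2 : t.length = k + 1 + rest.length := by
            rw [ht_decomp]; simp [hk]; omega
          have htake : t.take (k + 1) = tw ++ [d] := by
            rw [ht_decomp, List.take_append]
            simp [← hk]
          have hrest : cs.drop ((i+1) + k + 1) = rest := by
            have he : (i+1) + k + 1 = (i + 1) + (k + 1) := by omega
            rw [he, ← List.drop_drop, ← ht, ht_decomp, List.drop_append]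
            simp [← hk]
          have hslice2 : (cs.drop i).take (k + 2) = cs[i] :: (tw ++ [d]) := by
            rw [List.drop_eq_getElem_cons hi, ← ht]
            simp [List.take_succ_cons, htake]
          have hih := ih cs ((i+1) + k + 1) (tokens ++ [String.ofList (['['] ++ tw ++ [']'])])
            (by omega)
          rw [hrest] at hih
          rw [hslice, hslice2]
          show tokBFinish (List.foldl tokBStep
                (tokens ++ [String.ofList (['['] ++ tw ++ [']'])], TokPending.none) rest)
              = tokens ++ String.ofList (cs[i] :: (tw ++ [d])) :: tokALoop cs (i + 1 + k + 1)
          rw [hih]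
          simp [hbr, hd]
      rw [if_neg hbr]
      by_cases hup : PySem.Chars.isupper cs[i]
      · rw [if_pos hup]
        have hstep : tokBStep (tokens, TokPending.none) cs[i] = (tokens, TokPending.upper cs[i]) := by
          simp [tokBStep, tokBStart, hbr, hup]
        rw [hstep]
        by_cases h2 : i + 1 < cs.length
        · rw [dif_pos h2, List.drop_eq_getElem_cons h2, List.foldl_cons]
          by_cases hlow : PySem.Chars.islower cs[i+1]
          · rw [if_pos hlow]
            have hstep2 : tokBStep (tokens, TokPending.upper cs[i]) cs[i+1]
                = (tokens ++ [String.ofList [cs[i], cs[i+1]]], TokPending.none) := by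
              simp [tokBStep, hlow]
            rw [hstep2, ih cs (i+2) _ (by omega)]
            have hslice : PySem.List.slice cs (some (i:Int)) (some ((i:Int) + 2))
                = [cs[i], cs[i+1]] := by
              have hcast : ((i:Int) + 2) = (((i + 2 : Nat)) : Int) := by push_cast; ring
              rw [hcast, PySem.List.slice_natCast]
              rw [show i + 2 - i = 2 from by omega]
              rw [List.drop_eq_getElem_cons hi, List.drop_eq_getElem_cons h2]
              rfl
            rw [hslice]
            simp
          · rw [if_neg hlow]
            have hstep2 : tokBStep (tokens, TokPending.upper cs[i]) cs[i+1]
                = tokBStep (tokens ++ [String.ofList [cs[i]]], TokPending.none) cs[i+1] := by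
              simp [tokBStep, hlow]
            rw [hstep2, ← List.foldl_cons, ← List.drop_eq_getElem_cons h2,
              ih cs (i+1) _ (by omega)]
            simp
        · rw [dif_neg h2, List.drop_eq_nil_of_le (by omega)]
          rw [show tokALoop cs (i+1) = [] by rw [tokALoop, dif_neg (by omega)]]
          simp [tokBFinish]
      · rw [if_neg hup]
        have hstep : tokBStep (tokens, TokPending.none) cs[i]
            = (tokens ++ [String.ofList [cs[i]]], TokPending.none) := by
          simp [tokBStep, tokBStart, hbr, hup]
        rw [hstep, ih cs (i+1) _ (by omega)]
        simp

-- ===== VERDICT (by name: the statement is the Claim_ definition above) =====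
theorem tokenize_smiles_py_spec : Claim_equal_tokenize_smiles_py := by
  intro smiles _
  unfold Spec_tokenize_smiles_py tokenize_smiles_py tokenize_smiles_py_alt
  have := main_run smiles.toList.length smiles.toList 0 [] (by omega)
  simpa using this.symm
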